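-- pv_equiv track=rewrite | github.com/yqyang733/Deep-CovBoost | GenMol/GenMolLibrary.py | replace_node
-- ===== SOURCE A (Python) =====
-- def replace_node(smi, num, atom):
--     idx = 0
--     new_smi = ""
--     for i in smi:
--         if i == "*":
--             idx += 1
--             if idx == num:
--                 new_smi += atom
--             else:
--                 new_smi += i
--         else:
--             new_smi += i
--     return new_smi
-- ===== SOURCE B (Python) =====
-- def replace_node(smi, num, atom):
--     count = 0
--     pos = -1
--     for i, ch in enumerate(smi):
--         if ch == "*":
--             count += 1
--             if count == num:
--                 pos = i
--                 break
--     if pos == -1: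
--         return smi
--     return smi[:pos] + atom + smi[pos + 1:]
-- ===== Notes on version B (the rewrite author's own statement) =====
-- stated objective: simpler
-- what changed: B locates the index of the num-th '*' in one early-exiting scan and does a single slice-and-splice, instead of A's rebuilding the whole string character by character.
import Mathlib
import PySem

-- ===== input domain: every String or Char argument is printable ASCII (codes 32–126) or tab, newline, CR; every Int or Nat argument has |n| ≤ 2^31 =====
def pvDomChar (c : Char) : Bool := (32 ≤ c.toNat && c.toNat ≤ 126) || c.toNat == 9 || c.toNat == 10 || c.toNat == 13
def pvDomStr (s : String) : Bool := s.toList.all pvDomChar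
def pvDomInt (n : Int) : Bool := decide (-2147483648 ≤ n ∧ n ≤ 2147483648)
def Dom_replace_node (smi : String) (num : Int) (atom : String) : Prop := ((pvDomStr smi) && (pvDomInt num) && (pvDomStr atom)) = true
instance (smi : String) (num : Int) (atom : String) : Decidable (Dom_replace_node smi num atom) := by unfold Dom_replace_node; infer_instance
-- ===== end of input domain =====

-- B replaces the num-th '*' by one early-exiting index scan plus a single slice-and-splice (simpler decomposition; same cost).
-- ===== PORT A =====
-- A rebuilds the string char by char; accumulator kept as List Char (exact: "+=" on str is list append).
def pvLoopA (num : Int) (atom : List Char) : List Char → Int → List Char → List Char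
  | [], _, acc => acc
  | i :: t, idx, acc =>
    if i = '*' then
      if idx + 1 = num then pvLoopA num atom t (idx + 1) (acc ++ atom)
      else pvLoopA num atom t (idx + 1) (acc ++ [i])
    else pvLoopA num atom t idx (acc ++ [i])

def replace_node (smi : String) (num : Int) (atom : String) : String :=
  String.ofList (pvLoopA num atom.toList smi.toList 0 [])

-- ===== PORT B =====
-- index of the num-th '*' (early exit), counting from cnt
def pvFindStar (num : Int) : List Char → Int → Option Nat
  | [], _ => none
  | c :: t, cnt =>
    if c = '*' then
      if cnt + 1 = num then some 0
      else (pvFindStar num t (cnt + 1)).map (· + 1)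
    else (pvFindStar num t cnt).map (· + 1)

def replace_node_alt (smi : String) (num : Int) (atom : String) : String :=
  match pvFindStar num smi.toList 0 with
  | none => smi
  | some p => String.ofList (smi.toList.take p ++ atom.toList ++ smi.toList.drop (p + 1))

-- ===== PRECONDITION & SPEC =====
def Spec_replace_node (smi : String) (num : Int) (atom : String) (out : String) : Prop := out = replace_node_alt smi num atom
instance (smi : String) (num : Int) (atom : String) (out : String) : Decidable (Spec_replace_node smi num atom out) := by unfold Spec_replace_node; infer_instance

-- ===== CLAIM (what is proved, stated in full; the proofs are below) =====
def Claim_equal_replace_node : Prop := ∀ (smi : String) (num : Int) (atom : String), Dom_replace_node smi num atom → Spec_replace_node smi num atom (replace_node smi num atom)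

-- ===== LEMMAS AND PROOFS =====
lemma pvLoopA_ge (num : Int) (atom : List Char) (l : List Char) (idx : Int) (acc : List Char)
    (h : num ≤ idx) : pvLoopA num atom l idx acc = acc ++ l := by
  induction l generalizing idx acc with
  | nil => simp [pvLoopA]
  | cons c t ih =>
    simp only [pvLoopA]
    split_ifs with h1 h2
    · omega
    · rw [ih (idx + 1) _ (by omega)]; simp
    · rw [ih idx _ h]; simp

lemma pvLoopA_eq (num : Int) (atom : List Char) (l : List Char) (idx : Int) (acc : List Char) :
    pvLoopA num atom l idx acc = acc ++
      (match pvFindStar num l idx with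
       | none => l
       | some p => l.take p ++ atom ++ l.drop (p + 1)) := by
  induction l generalizing idx acc with
  | nil => simp [pvLoopA, pvFindStar]
  | cons c t ih =>
    simp only [pvLoopA, pvFindStar]
    split_ifs with h1 h2
    · rw [pvLoopA_ge num atom t (idx + 1) _ (by omega)]
      simp
    · rw [ih (idx + 1)]
      cases h : pvFindStar num t (idx + 1) with
      | none => simp
      | some p => simp [List.take_succ_cons, List.drop_succ_cons]
    · rw [ih idx]
      cases h : pvFindStar num t idx with
      | none => simp
      | some p => simp [List.take_succ_cons, List.drop_succ_cons]

-- ===== VERDICT (by name: the statement is the Claim_ definition above) =====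
theorem replace_node_spec : Claim_equal_replace_node := by
  intro smi num atom _
  unfold Spec_replace_node replace_node replace_node_alt
  rw [pvLoopA_eq]
  cases h : pvFindStar num smi.toList 0 with
  | none => simp [String.ofList]
  | some p => simp
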